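-- pv_equiv track=rewrite | github.com/LukasGritsch/UNI | 1.Semester/Programmiertechnik/ExerciseSheet_5.py | is_interesting_number
-- ===== SOURCE A (Python) =====
-- def sum_array(array):
--     hSum = 0
--     hIdx = 0
--
--     while hIdx < len(array):
--         if isinstance(array[hIdx],int):
--             hSum = hSum + array[hIdx]
--         hIdx = hIdx + 1
--
--     return hSum
--
-- def get_digits(n):
--     hDigitAsString = str(n)
--     hRetList = []
--     for i in range(0,len(hDigitAsString)):
--         hRetList.append(int(hDigitAsString[i]))
--     return hRetList
--
-- def digit_power_sum(digits, power):
--    return sum_array(digits)**power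
--
-- def is_interesting_number(n):
--     if n < 2:
--         return False
--
--     hIdx = 1
--     hNumber = 0
--     while  hNumber < n:
--         hNumber = digit_power_sum(get_digits(n),hIdx)
--         if hNumber == n:
--             return True
--         elif hNumber == 1:
--             return False
--         hIdx = hIdx +1
--
--     return False
-- ===== SOURCE B (Python) =====
-- def is_interesting_number(n):
--     if n < 2:
--         return False
--     s = sum(int(c) for c in str(n))
--     if s == 1:
--         return False
--     while n % s == 0:
--         n //= s
--     return n == 1
-- ===== Notes on version B (the rewrite author's own statement) =====
-- stated objective: simpler
-- what changed: B computes the digit sum once and tests power-of-base membership by repeatedly dividing n by the digit sum to exhaustion, instead of A's loop that rebuilds the digit list every iteration and multiplies successive powers s**k up towards n.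
import Mathlib
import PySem

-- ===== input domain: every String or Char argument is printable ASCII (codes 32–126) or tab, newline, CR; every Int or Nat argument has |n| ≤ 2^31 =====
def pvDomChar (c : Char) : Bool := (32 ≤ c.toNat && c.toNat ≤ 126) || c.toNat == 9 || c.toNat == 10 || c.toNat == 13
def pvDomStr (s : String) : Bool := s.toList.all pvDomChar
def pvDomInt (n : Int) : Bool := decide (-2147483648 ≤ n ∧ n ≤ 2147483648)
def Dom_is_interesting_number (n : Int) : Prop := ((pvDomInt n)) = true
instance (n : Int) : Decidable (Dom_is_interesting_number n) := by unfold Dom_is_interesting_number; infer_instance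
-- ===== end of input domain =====

-- B replaces A's "rebuild the digit list and multiply up successive powers s**k" loop by a
-- single digit-sum computation followed by repeated division of n by that sum (objective: simpler).

-- ===== PORT A =====

-- int(ch) for a single character: exact for the digit characters '0'..'9' that str(n) produces
-- for the nonnegative n both programs reach it with.
def pyDigitVal (c : Char) : Int := (c.toNat : Int) - 48

-- sum_array: every element of the list is an int, so the isinstance test is always true.
def sum_array (array : List Int) : Int := array.foldl (fun hSum x => hSum + x) 0

-- get_digits: append int(str(n)[i]) for each position i, i.e. an append-fold over the characters.
def get_digits (n : Int) : List Int :=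
  (PySem.Int.toStr n).toList.foldl (fun hRetList c => hRetList ++ [pyDigitVal c]) []

def digit_power_sum (digits : List Int) (power : Nat) : Int := (sum_array digits) ^ power

-- A's while loop; fuel only makes the recursion total (never exhausted on the inputs A reaches:
-- the loop runs at most n iterations before hNumber ≥ n or an early return).
def aLoop (n : Int) : Nat → Nat → Int → Bool
  | 0, _, _ => false
  | fuel + 1, hIdx, hNumber =>
    if hNumber < n then
      let hNumber' := digit_power_sum (get_digits n) hIdx
      if hNumber' = n then true
      else if hNumber' = 1 then false
      else aLoop n fuel (hIdx + 1) hNumber'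
    else false

def is_interesting_number (n : Int) : Bool :=
  if n < 2 then false else aLoop n (n.toNat + 2) 1 0

-- ===== PORT B =====

-- s = sum(int(c) for c in str(n))
def digitSumB (n : Int) : Int :=
  (PySem.Int.toStr n).toList.foldl (fun a c => a + pyDigitVal c) 0

-- while n % s == 0: n //= s  (fuel n.toNat only makes it total; the divisor s ≥ 2 here,
-- so n strictly decreases and the fuel is never exhausted).
def bLoop (s : Int) : Nat → Int → Bool
  | 0, m => m == 1
  | fuel + 1, m =>
    if PySem.Int.mod m s = 0 then bLoop s fuel (PySem.Int.floordiv m s) else m == 1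

def is_interesting_number_alt (n : Int) : Bool :=
  if n < 2 then false
  else
    let s := digitSumB n
    if s = 1 then false else bLoop s n.toNat n

-- ===== PRECONDITION & SPEC =====

def Spec_is_interesting_number (n : Int) (out : Bool) : Prop := out = is_interesting_number_alt n
instance (n : Int) (out : Bool) : Decidable (Spec_is_interesting_number n out) := by
  unfold Spec_is_interesting_number; infer_instance

-- ===== CLAIM =====

def Claim_equal_is_interesting_number : Prop :=
  ∀ (n : Int), Dom_is_interesting_number n → Spec_is_interesting_number n (is_interesting_number n)

-- ===== LEMMAS AND PROOFS =====

-- A's digit sum and B's digit sum are the same fold.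
theorem sumA_eq_sumB (n : Int) : sum_array (get_digits n) = digitSumB n := by
  simp only [sum_array, get_digits, digitSumB, PySem.List.foldl_append_singleton_eq_map,
    List.nil_append, List.foldl_map]

theorem dsum_ge_of_digits (cs : List Char) (h : ∀ c ∈ cs, 48 ≤ c.toNat) (a : Int) :
    a ≤ cs.foldl (fun x c => x + pyDigitVal c) a := by
  induction cs generalizing a with
  | nil => simp
  | cons c cs ih =>
    simp only [List.foldl_cons]
    have h1 : 48 ≤ c.toNat := h c (by simp)
    have := ih (fun d hd => h d (by simp [hd])) (a + pyDigitVal c)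
    have : a + pyDigitVal c ≤ _ := this
    refine le_trans ?_ this
    simp [pyDigitVal]; omega

theorem digitVal_digitChar (k : Nat) (hk : k < 10) :
    pyDigitVal (Nat.digitChar k) = (k : Int) ∧ 48 ≤ (Nat.digitChar k).toNat := by
  interval_cases k <;> simp [pyDigitVal, Nat.digitChar]

theorem dsum_toDigitsCore (fuel : Nat) :
    ∀ (m : Nat) (ds : List Char) (a : Int), 1 ≤ m → m < 10 ^ fuel →
      (∀ c ∈ ds, 48 ≤ c.toNat) →
      a + 1 ≤ (Nat.toDigitsCore 10 fuel m ds).foldl (fun x c => x + pyDigitVal c) a := by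
  induction fuel with
  | zero => intro m ds a h1 h2 _; omega
  | succ fuel ih =>
    intro m ds a h1 h2 hds
    have hlt : m % 10 < 10 := Nat.mod_lt _ (by omega)
    obtain ⟨hval, hge⟩ := digitVal_digitChar (m % 10) hlt
    have hds' : ∀ c ∈ (Nat.digitChar (m % 10) :: ds), 48 ≤ c.toNat := by
      intro c hc; rcases List.mem_cons.mp hc with h | h
      · exact h ▸ hge
      · exact hds c h
    rw [Nat.toDigitsCore]
    by_cases hz : m / 10 = 0
    · simp only [hz, reduceIte, List.foldl_cons]
      have hm10 : 1 ≤ m % 10 := by omega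
      have hrest := dsum_ge_of_digits ds hds (a + pyDigitVal (Nat.digitChar (m % 10)))
      rw [hval] at hrest
      have hgoal : a + (m % 10 : Int) ≤
          List.foldl (fun x c => x + pyDigitVal c) (a + pyDigitVal (Nat.digitChar (m % 10))) ds := by
        rw [hval]; exact hrest
      omega
    · simp only [hz, reduceIte]
      have h2' : m / 10 < 10 ^ fuel := by
        rw [pow_succ] at h2; omega
      exact ih (m / 10) (Nat.digitChar (m % 10) :: ds) a (by omega) h2' hds'

-- For n ≥ 2 the digit sum of str(n) is at least 1.
theorem digitSum_pos (n : Int) (hn : 2 ≤ n) : 1 ≤ digitSumB n := by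
  have hneg : ¬ n < 0 := by omega
  have hchars : (PySem.Int.toStr n).toList = Nat.toDigits 10 n.toNat := by
    rw [PySem.Int.toList_toStr]
    simp [PySem.Int.toChars, hneg]
  rw [digitSumB, hchars, Nat.toDigits]
  have h1 : 1 ≤ n.toNat := by omega
  have h2 : n.toNat < 10 ^ (n.toNat + 1) :=
    lt_of_lt_of_le (Nat.lt_pow_self (by omega)) (Nat.pow_le_pow_right (by omega) (by omega))
  have := dsum_toDigitsCore (n.toNat + 1) n.toNat [] 0 h1 h2 (by simp)
  omega

theorem int_lt_pow_self (s : Int) (hs : 2 ≤ s) (k : Nat) : (k : Int) < s ^ k := by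
  calc (k : Int) < (2 : Int) ^ k := by exact_mod_cast Nat.lt_two_pow_self
    _ ≤ s ^ k := pow_le_pow_left₀ (by omega) hs k

theorem aLoop_iff (n s : Int) (hsdef : s = sum_array (get_digits n)) (hs : 2 ≤ s) (hn : 2 ≤ n)
    (fuel : Nat) :
    ∀ (hIdx : Nat) (h : Int), 1 ≤ hIdx → (h = s ^ (hIdx - 1) ∨ (hIdx = 1 ∧ h = 0)) →
      n.toNat < fuel + hIdx →
      (aLoop n fuel hIdx h = true ↔ ∃ k : Nat, hIdx ≤ k ∧ s ^ k = n) := by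
  induction fuel with
  | zero =>
    intro hIdx h h1 _ hbound
    simp only [aLoop, Bool.false_eq_true, false_iff]
    rintro ⟨k, hk, hpow⟩
    have : (k : Int) < s ^ k := int_lt_pow_self s hs k
    have : (n : Int) ≤ (k : Int) := by
      have : n.toNat < k := by omega
      omega
    omega
  | succ fuel ih =>
    intro hIdx h h1 hinv hbound
    rw [aLoop]
    by_cases hlt : h < n
    · simp only [if_pos hlt]
      have hpows : digit_power_sum (get_digits n) hIdx = s ^ hIdx := by
        rw [digit_power_sum, hsdef]
      rw [hpows]
      by_cases heq : s ^ hIdx = n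
      · simp only [if_pos heq, true_iff]
        exact ⟨hIdx, le_refl _, heq⟩
      · simp only [if_neg heq]
        have hone : ¬ s ^ hIdx = 1 := by
          have : s ^ 1 ≤ s ^ hIdx := pow_le_pow_right₀ (by omega) h1
          simp at this; omega
        simp only [if_neg hone]
        rw [ih (hIdx + 1) (s ^ hIdx) (by omega) (Or.inl (by simp)) (by omega)]
        constructor
        · rintro ⟨k, hk, hp⟩; exact ⟨k, by omega, hp⟩
        · rintro ⟨k, hk, hp⟩
          refine ⟨k, ?_, hp⟩
          rcases Nat.eq_or_lt_of_le hk with rfl | h'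
          · exact absurd hp heq
          · omega
    · simp only [if_neg hlt, Bool.false_eq_true, false_iff]
      rintro ⟨k, hk, hpow⟩
      have hh : h = s ^ (hIdx - 1) := by
        rcases hinv with h' | ⟨_, h'⟩
        · exact h'
        · omega
      have hmono : s ^ (hIdx - 1) * s ≤ s ^ k := by
        calc s ^ (hIdx - 1) * s = s ^ (hIdx - 1 + 1) := (pow_succ s _).symm
          _ ≤ s ^ k := pow_le_pow_right₀ (by omega) (by omega)
      have hpos : 0 < s ^ (hIdx - 1) := pow_pos (by omega) _
      nlinarith [hpow, hh, hmono, hpos]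

theorem bLoop_iff (s : Int) (hs : 2 ≤ s) (fuel : Nat) :
    ∀ (m : Int), 1 ≤ m → m.toNat ≤ fuel →
      (bLoop s fuel m = true ↔ ∃ k : Nat, s ^ k = m) := by
  induction fuel with
  | zero => intro m h1 h2; omega
  | succ fuel ih =>
    intro m h1 h2
    rw [bLoop]
    by_cases hdvd : PySem.Int.mod m s = 0
    · have hsd : s ∣ m := (PySem.Int.mod_eq_zero_iff_dvd m s).mp hdvd
      have hsm : s ≤ m := Int.le_of_dvd (by omega) hsd
      have hfd : PySem.Int.floordiv m s = m / s := PySem.Int.floordiv_eq_ediv_of_pos (by omega)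
      have hm1 : 1 ≤ m / s := (Int.le_ediv_iff_of_dvd_of_pos (by omega) hsd).mpr (by omega)
      have hmlt : m / s < m := (Int.ediv_lt_iff_of_dvd_of_pos (by omega) hsd).mpr (by nlinarith)
      have hft : (m / s).toNat ≤ fuel := by omega
      simp only [if_pos hdvd, hfd]
      rw [ih (m / s) hm1 hft]
      constructor
      · rintro ⟨k, hk⟩
        refine ⟨k + 1, ?_⟩
        rw [pow_succ, hk, Int.ediv_mul_cancel hsd]
      · rintro ⟨k, hk⟩
        cases k with
        | zero => simp at hk; omega
        | succ j =>
          refine ⟨j, ?_⟩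
          rw [pow_succ] at hk
          have : s ^ j * s / s = m / s := by rw [hk]
          rwa [Int.mul_ediv_cancel _ (by omega)] at this
    · simp only [if_neg hdvd, beq_iff_eq]
      constructor
      · intro hm; exact ⟨0, by simp [hm]⟩
      · rintro ⟨k, hk⟩
        cases k with
        | zero => simpa using hk.symm
        | succ j =>
          exfalso
          apply hdvd
          rw [PySem.Int.mod_eq_zero_iff_dvd]
          exact hk ▸ Dvd.intro (s ^ j) (mul_comm s (s ^ j) ▸ (pow_succ s j).symm ▸ rfl)

-- ===== VERDICT =====

theorem is_interesting_number_spec : Claim_equal_is_interesting_number := by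
  intro n _
  unfold Spec_is_interesting_number is_interesting_number is_interesting_number_alt
  by_cases hn : n < 2
  · simp [hn]
  · simp only [if_neg hn]
    rw [Int.not_lt] at hn
    have hseq : sum_array (get_digits n) = digitSumB n := sumA_eq_sumB n
    have hs1 : 1 ≤ digitSumB n := digitSum_pos n hn
    by_cases hone : digitSumB n = 1
    · -- first loop iteration: hNumber' = s ** 1 = 1 → return False
      simp only [if_pos hone]
      show aLoop n (n.toNat + 2) 1 0 = false
      rw [aLoop]
      have h0 : (0 : Int) < n := by omega
      have hp : digit_power_sum (get_digits n) 1 = 1 := by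
        simp [digit_power_sum, hseq, hone]
      simp [h0, hp]
      omega
    · simp only [if_neg hone]
      have hs2 : 2 ≤ digitSumB n := by omega
      have hA := aLoop_iff n (digitSumB n) hseq.symm hs2 hn (n.toNat + 2) 1 0 (by omega)
        (Or.inr ⟨rfl, rfl⟩) (by omega)
      have hB := bLoop_iff (digitSumB n) hs2 n.toNat n (by omega) (le_refl _)
      rw [Bool.eq_iff_iff, hA, hB]
      constructor
      · rintro ⟨k, _, hk⟩; exact ⟨k, hk⟩
      · rintro ⟨k, hk⟩
        cases k with
        | zero => simp at hk; omega
        | succ j => exact ⟨j + 1, by omega, hk⟩
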